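-- pv_equiv track=rewrite | github.com/lying2020/VoCoT | utils/token_entropy_viz.py | coordinate_inner_trace_indices
-- ===== SOURCE A (Python) =====
-- from typing import Any, Sequence
--
-- def _norm_decode_tok(tok: str | None) -> str:
--     if tok is None:
--         return ""
--     return str(tok).strip()
--
-- def coordinate_inner_trace_indices(trace: list[dict[str, Any]]) -> set[int]:
--     """
--     Indices of steps whose decoded string lies **between** a ``<coor>`` and the next ``</coor>``
--     (exclusive of the tag tokens themselves): i.e. bbox number / comma / dot stream tokens.
--     Unclosed ``<coor>`` treats everything after it until end of trace as inner.
--     """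
--     inner: set[int] = set()
--     in_span = False
--     for i, row in enumerate(trace):
--         t = _norm_decode_tok(row.get("token"))
--         if not in_span:
--             if t == "<coor>":
--                 in_span = True
--             continue
--         if t == "</coor>":
--             in_span = False
--             continue
--         inner.add(i)
--     return inner
-- ===== SOURCE B (Python) =====
-- def _norm_decode_tok(tok):
--     if tok is None:
--         return ""
--     return str(tok).strip()
--
-- def coordinate_inner_trace_indices(trace):
--     # Pass 1: collect only the tag tokens with their indices.
--     tags = []
--     for i, row in enumerate(trace):
--         t = _norm_decode_tok(row.get("token"))
--         if t == "<coor>" or t == "</coor>":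
--             tags.append((i, t))
--     # Pass 2: pair opens with the next close and union whole index ranges.
--     inner = set()
--     open_idx = None
--     for i, t in tags:
--         if open_idx is None:
--             if t == "<coor>":
--                 open_idx = i
--         elif t == "</coor>":
--             inner |= set(range(open_idx + 1, i))
--             open_idx = None
--     if open_idx is not None:
--         inner |= set(range(open_idx + 1, len(trace)))
--     return inner
-- ===== Notes on version B (the rewrite author's own statement) =====
-- stated objective: alternative
-- what changed: B replaces A's per-element in_span boolean toggle over the whole trace by a two-pass decomposition: one pass extracts only the (index, tag) pairs for <coor>/</coor> tokens, then a scan over that compact tag list unions whole index ranges range(open+1, close) per matched pair (and range(open+1, len(trace)) for an unclosed open).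
import Mathlib
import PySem

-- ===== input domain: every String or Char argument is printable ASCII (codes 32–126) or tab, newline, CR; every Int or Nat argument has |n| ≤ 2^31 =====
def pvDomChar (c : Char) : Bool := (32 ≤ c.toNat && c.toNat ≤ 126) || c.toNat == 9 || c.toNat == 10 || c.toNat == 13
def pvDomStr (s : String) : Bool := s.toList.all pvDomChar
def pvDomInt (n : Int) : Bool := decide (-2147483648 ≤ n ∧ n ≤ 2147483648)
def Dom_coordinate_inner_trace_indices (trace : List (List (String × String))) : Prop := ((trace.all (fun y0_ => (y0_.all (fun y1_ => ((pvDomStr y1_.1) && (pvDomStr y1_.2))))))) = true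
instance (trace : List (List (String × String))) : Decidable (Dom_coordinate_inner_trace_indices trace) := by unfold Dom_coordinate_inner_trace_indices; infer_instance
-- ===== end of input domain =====

-- B collects the tag tokens in one pass and then unions whole index ranges per open/close pair,
-- instead of A's per-element boolean toggle; objective: alternative decomposition, return value only.

-- ===== PORT A =====
-- _norm_decode_tok (shared module helper of both A and B)
def pvNormTok (tok : Option String) : String :=
  match tok with
  | none => ""
  | some s => PySem.Str.strip s

-- one iteration of A's for-loop; state = (inner, in_span)
def pvStepA (st : PySem.Set Int × Bool) (p : Int × List (String × String)) : PySem.Set Int × Bool :=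
  let t := pvNormTok ((PySem.Dict.mk p.2).get? "token")
  if st.2 = false then
    if t = "<coor>" then (st.1, true) else (st.1, false)
  else if t = "</coor>" then (st.1, false)
  else (PySem.Set.add st.1 p.1, true)

def coordinate_inner_trace_indices (trace : List (List (String × String))) : List Int :=
  ((PySem.List.enumerate trace).foldl pvStepA (PySem.Set.empty, false)).1

-- ===== PORT B =====
-- pass 1: the (index, tag) pairs of the tag tokens, indices starting at s
def pvTags (xs : List (List (String × String))) (s : Int) : List (Int × String) :=
  (PySem.List.enumerate xs s).filterMap (fun p =>
    let t := pvNormTok ((PySem.Dict.mk p.2).get? "token")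
    if t = "<coor>" ∨ t = "</coor>" then some (p.1, t) else none)

-- one iteration of B's second pass; state = (inner, open_idx)
def pvStepB (st : PySem.Set Int × Option Int) (q : Int × String) : PySem.Set Int × Option Int :=
  match st.2 with
  | none => if q.2 = "<coor>" then (st.1, some q.1) else (st.1, none)
  | some o =>
      if q.2 = "</coor>" then (PySem.Set.union st.1 (PySem.List.pyRange (o + 1) q.1 1), none)
      else st

def coordinate_inner_trace_indices_alt (trace : List (List (String × String))) : List Int :=
  let st := (pvTags trace 0).foldl pvStepB (PySem.Set.empty, none)
  match st.2 with
  | some o => PySem.Set.union st.1 (PySem.List.pyRange (o + 1) (PySem.List.len trace) 1)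
  | none => st.1

-- ===== PRECONDITION & SPEC =====
def Spec_coordinate_inner_trace_indices (trace : List (List (String × String))) (out : List Int) : Prop := out = coordinate_inner_trace_indices_alt trace
instance (trace : List (List (String × String))) (out : List Int) : Decidable (Spec_coordinate_inner_trace_indices trace out) := by unfold Spec_coordinate_inner_trace_indices; infer_instance

-- ===== CLAIM (what is proved, stated in full; the proofs are below) =====
def Claim_equal_coordinate_inner_trace_indices : Prop := ∀ (trace : List (List (String × String))), Dom_coordinate_inner_trace_indices trace → Spec_coordinate_inner_trace_indices trace (coordinate_inner_trace_indices trace)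

-- ===== LEMMAS AND PROOFS =====

-- the tail of B's computation: run the second pass from (inner, o) over the tags of xs
-- (indices from s) and finalize a still-open span at s + xs.length
def pvBrun (inner : PySem.Set Int) (o : Option Int) (xs : List (List (String × String))) (s : Int) : List Int :=
  let st := (pvTags xs s).foldl pvStepB (inner, o)
  match st.2 with
  | some o' => PySem.Set.union st.1 (PySem.List.pyRange (o' + 1) (s + xs.length) 1)
  | none => st.1

lemma pvUnion_eq_append (inner : List Int) (a b : Int) (h : ∀ x ∈ inner, x < a) :
    PySem.Set.union inner (PySem.List.pyRange a b 1) = inner ++ PySem.List.pyRange a b 1 := by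
  apply PySem.Set.update_eq_append_of_disjoint
  · exact PySem.List.nodup_pyRange_one a b
  · intro x hx hmem
    rw [PySem.List.mem_pyRange_one] at hx
    exact absurd (h x hmem) (by omega)

lemma pvMain : ∀ (xs : List (List (String × String))) (s : Int) (inner : List Int),
    (∀ x ∈ inner, x < s) →
    (((PySem.List.enumerate xs s).foldl pvStepA (inner, false)).1 = pvBrun inner none xs s
      ∧ ∀ o : Int, o < s → (∀ x ∈ inner, x < o + 1) →
        ((PySem.List.enumerate xs s).foldl pvStepA
            (inner ++ PySem.List.pyRange (o + 1) s 1, true)).1 = pvBrun inner (some o) xs s) := by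
  intro xs
  induction xs with
  | nil =>
      intro s inner hlt
      constructor
      · simp [pvBrun, pvTags, PySem.List.enumerate]
      · intro o ho hle
        simp [pvBrun, pvTags, PySem.List.enumerate]
        rw [pvUnion_eq_append inner (o + 1) s (fun x hx => by have := hle x hx; omega)]
  | cons r rest ih =>
      intro s inner hlt
      have henum : PySem.List.enumerate (r :: rest) s = (s, r) :: PySem.List.enumerate rest (s + 1) :=
        PySem.List.enumerate_cons r rest s
      have htags : ∀ t : Int, pvTags (r :: rest) t =
          (let u := pvNormTok ((PySem.Dict.mk r).get? "token")
           if u = "<coor>" ∨ u = "</coor>" then [(t, u)] else []) ++ pvTags rest (t + 1) := by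
        intro t
        simp [pvTags, PySem.List.enumerate_cons, List.filterMap_cons]
        split_ifs <;> simp
      set u := pvNormTok ((PySem.Dict.mk r).get? "token") with hu
      constructor
      · -- closed state
        rw [henum, List.foldl_cons]
        by_cases hopen : u = "<coor>"
        · -- opens a span
          have hA : pvStepA (inner, false) (s, r) = (inner, true) := by
            simp [pvStepA, ← hu, hopen]
          rw [hA]
          have h2 := ((ih (s + 1) inner (fun x hx => by have := hlt x hx; omega)).2 s (by omega)
            (fun x hx => by have := hlt x hx; omega))
          have hnilrange : PySem.List.pyRange (s + 1) (s + 1) 1 = [] :=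
            PySem.List.pyRange_one_eq_nil (le_refl _)
          rw [hnilrange, List.append_nil] at h2
          rw [h2]
          -- B side: head tag is an open, recorded
          simp only [pvBrun, htags s, hopen]
          simp [List.foldl_cons, pvStepB, List.length_cons]
          ring_nf
        · -- stays closed (whether head is a stray close or an ordinary token)
          have hA : pvStepA (inner, false) (s, r) = (inner, false) := by
            simp [pvStepA, ← hu, hopen]
          rw [hA]
          have h1 := (ih (s + 1) inner (fun x hx => by have := hlt x hx; omega)).1
          rw [h1]
          simp only [pvBrun, htags s]
          by_cases hclose : u = "</coor>"
          · simp [hclose, List.foldl_cons, pvStepB, List.length_cons]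
            ring_nf
          · simp [hclose, hopen, List.length_cons]
            ring_nf
      · -- open state, with open index o
        intro o ho hle
        rw [henum, List.foldl_cons]
        by_cases hclose : u = "</coor>"
        · -- closes the span
          have hA : pvStepA (inner ++ PySem.List.pyRange (o + 1) s 1, true) (s, r)
              = (inner ++ PySem.List.pyRange (o + 1) s 1, false) := by
            simp [pvStepA, ← hu, hclose]
          rw [hA]
          have hlt' : ∀ x ∈ inner ++ PySem.List.pyRange (o + 1) s 1, x < s + 1 := by
            intro x hx
            rcases List.mem_append.mp hx with h | h
            · have := hle x h; omega
            · rw [PySem.List.mem_pyRange_one] at h; omega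
          have h1 := (ih (s + 1) (inner ++ PySem.List.pyRange (o + 1) s 1) hlt').1
          rw [h1]
          simp only [pvBrun, htags s, hclose, or_true, if_true, List.singleton_append,
            List.foldl_cons, pvStepB, List.length_cons]
          rw [pvUnion_eq_append inner (o + 1) s (fun x hx => by have := hle x hx; omega)]
          push_cast
          ring_nf
        · -- inner token (including a nested "<coor>"): added to inner; B keeps the span open
          have hA : pvStepA (inner ++ PySem.List.pyRange (o + 1) s 1, true) (s, r)
              = (PySem.Set.add (inner ++ PySem.List.pyRange (o + 1) s 1) s, true) := by
            simp [pvStepA, ← hu, hclose]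
          rw [hA]
          have hnot : s ∉ inner ++ PySem.List.pyRange (o + 1) s 1 := by
            intro hmem
            rcases List.mem_append.mp hmem with h | h
            · exact absurd (hle s h) (by omega)
            · rw [PySem.List.mem_pyRange_one] at h; omega
          rw [PySem.Set.add_of_not_mem hnot]
          have hrange : PySem.List.pyRange (o + 1) s 1 ++ [s] = PySem.List.pyRange (o + 1) (s + 1) 1 :=
            (PySem.List.pyRange_one_succ_right (by omega)).symm
          rw [List.append_assoc, hrange]
          have h2 := ((ih (s + 1) inner (fun x hx => by have := hle x hx; omega)).2 o (by omega)
            (fun x hx => hle x hx))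
          rw [h2]
          simp only [pvBrun, htags s]
          by_cases hopen : u = "<coor>"
          · simp [hopen, List.foldl_cons, pvStepB, List.length_cons]
            ring_nf
          · simp [hopen, hclose, List.length_cons]
            ring_nf

-- ===== VERDICT (by name: the statement is the Claim_ definition above) =====
theorem coordinate_inner_trace_indices_spec : Claim_equal_coordinate_inner_trace_indices := by
  intro trace _
  unfold Spec_coordinate_inner_trace_indices coordinate_inner_trace_indices coordinate_inner_trace_indices_alt
  have h := (pvMain trace 0 [] (by simp)).1
  simp only [PySem.Set.empty] at *
  rw [h]
  simp [pvBrun, PySem.List.len]
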